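-- pv_equiv track=rewrite | github.com/brownidj/paleo_01 | scripts/data_ops/infer_collection_events_from_finds.py | _choose_trip_for_event
-- ===== SOURCE A (Python) =====
-- def _choose_trip_for_event(
--     trip_rows_by_location: dict[int, list[tuple[int, int | None, int | None]]],
--     location_id: int,
--     event_year: int,
-- ) -> int | None:
--     candidates = trip_rows_by_location.get(location_id, [])
--     if not candidates:
--         return None
--     valid = [
--         trip
--         for trip in candidates
--         if (trip[1] is None or trip[1] <= event_year) and (trip[2] is None or event_year <= trip[2])
--     ]
--     if len(valid) == 1:
--         return int(valid[0][0])
--     pool = valid if valid else candidates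
--     closest = min(
--         pool,
--         key=lambda trip: (
--             abs((trip[1] if trip[1] is not None else event_year) - event_year),
--             int(trip[0]),
--         ),
--     )
--     return int(closest[0])
-- ===== SOURCE B (Python) =====
-- def _choose_trip_for_event(
--     trip_rows_by_location,
--     location_id,
--     event_year,
-- ):
--     best_valid = None  # (abs-distance, trip id) of best valid trip so far
--     best_any = None    # same over all candidate trips
--     for trip in trip_rows_by_location.get(location_id, []):
--         start, end = trip[1], trip[2]
--         key = (abs((start if start is not None else event_year) - event_year), int(trip[0]))
--         if best_any is None or key < best_any:
--             best_any = key
--         if (start is None or start <= event_year) and (end is None or event_year <= end):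
--             if best_valid is None or key < best_valid:
--                 best_valid = key
--     if best_valid is not None:
--         return best_valid[1]
--     if best_any is not None:
--         return best_any[1]
--     return None
-- ===== Notes on version B (the rewrite author's own statement) =====
-- stated objective: simpler
-- what changed: Replaced A's filter + len==1 special case + min(pool, key=...) with a single loop over the candidates that maintains two running best keys (best valid, best overall) and picks the id from whichever exists.
import Mathlib
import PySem

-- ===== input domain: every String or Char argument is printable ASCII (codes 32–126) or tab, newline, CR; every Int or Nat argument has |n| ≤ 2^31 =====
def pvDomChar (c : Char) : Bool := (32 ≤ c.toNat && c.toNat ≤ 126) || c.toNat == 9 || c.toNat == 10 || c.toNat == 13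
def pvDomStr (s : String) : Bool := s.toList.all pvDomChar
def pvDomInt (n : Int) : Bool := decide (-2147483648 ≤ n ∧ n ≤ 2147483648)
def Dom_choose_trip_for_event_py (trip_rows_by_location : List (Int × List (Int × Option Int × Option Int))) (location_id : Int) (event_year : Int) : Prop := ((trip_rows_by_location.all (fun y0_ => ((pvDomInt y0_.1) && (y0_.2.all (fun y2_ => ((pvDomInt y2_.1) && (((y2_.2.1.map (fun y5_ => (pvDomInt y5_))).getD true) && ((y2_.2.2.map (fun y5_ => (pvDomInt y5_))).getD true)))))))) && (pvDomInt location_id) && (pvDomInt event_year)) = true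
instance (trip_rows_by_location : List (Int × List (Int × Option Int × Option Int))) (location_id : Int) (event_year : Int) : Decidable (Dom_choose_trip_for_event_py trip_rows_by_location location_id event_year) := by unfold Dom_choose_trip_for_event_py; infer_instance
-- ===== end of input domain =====

-- B is a single accumulator pass (best valid key / best overall key) instead of A's
-- filter + length special-case + min with key; objective: simpler one-pass decomposition, same cost.

-- ===== PORT A =====
-- trip validity test: (trip[1] is None or trip[1] <= event_year) and (trip[2] is None or event_year <= trip[2])
def pvValid (event_year : Int) (t : Int × Option Int × Option Int) : Bool :=
  (match t.2.1 with | none => true | some s => decide (s ≤ event_year)) &&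
  (match t.2.2 with | none => true | some e => decide (event_year ≤ e))

-- the min key: (abs((trip[1] if trip[1] is not None else event_year) - event_year), int(trip[0]))
def pvKey1 (event_year : Int) (t : Int × Option Int × Option Int) : Int :=
  |(match t.2.1 with | some s => s | none => event_year) - event_year|

def choose_trip_for_event_py (trip_rows_by_location : List (Int × List (Int × Option Int × Option Int))) (location_id : Int) (event_year : Int) : Option Int :=
  let candidates := (PySem.Dict.mk trip_rows_by_location).getD location_id []
  if candidates = [] then none
  else
    let valid := candidates.filter (pvValid event_year)
    if valid.length = 1 then (PySem.List.pyGet? valid 0).map (·.1)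
    else
      let pool := if valid = [] then candidates else valid
      (PySem.List.min2? pool (pvKey1 event_year) (fun t => t.1)).map (·.1)

-- ===== PORT B =====
-- one step of Source B's loop: acc = (best_valid, best_any), each an optional key pair
def pvAltStep (event_year : Int) (acc : Option (Int × Int) × Option (Int × Int))
    (t : Int × Option Int × Option Int) : Option (Int × Int) × Option (Int × Int) :=
  let key : Int × Int := (|(match t.2.1 with | some s => s | none => event_year) - event_year|, t.1)
  let best_any := match acc.2 with
    | none => some key
    | some b => if key.1 < b.1 ∨ (key.1 = b.1 ∧ key.2 < b.2) then some key else some b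
  let best_valid :=
    if ((match t.2.1 with | none => true | some s => decide (s ≤ event_year)) &&
        (match t.2.2 with | none => true | some e => decide (event_year ≤ e))) then
      match acc.1 with
      | none => some key
      | some b => if key.1 < b.1 ∨ (key.1 = b.1 ∧ key.2 < b.2) then some key else some b
    else acc.1
  (best_valid, best_any)

def choose_trip_for_event_py_alt (trip_rows_by_location : List (Int × List (Int × Option Int × Option Int))) (location_id : Int) (event_year : Int) : Option Int :=
  let r := ((PySem.Dict.mk trip_rows_by_location).getD location_id []).foldl (pvAltStep event_year) (none, none)
  match r.1 with
  | some k => some k.2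
  | none =>
    match r.2 with
    | some k => some k.2
    | none => none

-- ===== PRECONDITION & SPEC =====
def Spec_choose_trip_for_event_py (trip_rows_by_location : List (Int × List (Int × Option Int × Option Int))) (location_id : Int) (event_year : Int) (out : Option Int) : Prop := out = choose_trip_for_event_py_alt trip_rows_by_location location_id event_year
instance (trip_rows_by_location : List (Int × List (Int × Option Int × Option Int))) (location_id : Int) (event_year : Int) (out : Option Int) : Decidable (Spec_choose_trip_for_event_py trip_rows_by_location location_id event_year out) := by unfold Spec_choose_trip_for_event_py; infer_instance

-- ===== CLAIM (what is proved, stated in full; the proofs are below) =====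
def Claim_equal_choose_trip_for_event_py : Prop := ∀ (trip_rows_by_location : List (Int × List (Int × Option Int × Option Int))) (location_id : Int) (event_year : Int), Dom_choose_trip_for_event_py trip_rows_by_location location_id event_year → Spec_choose_trip_for_event_py trip_rows_by_location location_id event_year (choose_trip_for_event_py trip_rows_by_location location_id event_year)

-- ===== LEMMAS AND PROOFS =====

-- the key as a pair, and the two single-accumulator updates B's step is made of
def pvKeyF (ey : Int) (t : Int × Option Int × Option Int) : Int × Int := (pvKey1 ey t, t.1)

def pvAnyUpd (ey : Int) (acc : Option (Int × Int)) (t : Int × Option Int × Option Int) : Option (Int × Int) :=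
  match acc with
  | none => some (pvKeyF ey t)
  | some b => if (pvKeyF ey t).1 < b.1 ∨ ((pvKeyF ey t).1 = b.1 ∧ (pvKeyF ey t).2 < b.2) then some (pvKeyF ey t) else some b

def pvVUpd (ey : Int) (acc : Option (Int × Int)) (t : Int × Option Int × Option Int) : Option (Int × Int) :=
  if pvValid ey t then pvAnyUpd ey acc t else acc

theorem pvAltStep_eq (ey : Int) (acc : Option (Int × Int) × Option (Int × Int)) (t : Int × Option Int × Option Int) :
    pvAltStep ey acc t = (pvVUpd ey acc.1 t, pvAnyUpd ey acc.2 t) := rfl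

theorem pv_fold_pair (ey : Int) (xs : List (Int × Option Int × Option Int))
    (a b : Option (Int × Int)) :
    xs.foldl (pvAltStep ey) (a, b) = (xs.foldl (pvVUpd ey) a, xs.foldl (pvAnyUpd ey) b) := by
  induction xs generalizing a b with
  | nil => rfl
  | cons x xs ih => simp only [List.foldl_cons, pvAltStep_eq]; exact ih _ _

theorem pv_fold_filter (ey : Int) (xs : List (Int × Option Int × Option Int)) (a : Option (Int × Int)) :
    xs.foldl (pvVUpd ey) a = (xs.filter (pvValid ey)).foldl (pvAnyUpd ey) a := by
  induction xs generalizing a with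
  | nil => rfl
  | cons x xs ih =>
    by_cases h : pvValid ey x
    · simp [List.foldl_cons, h, pvVUpd, ih]
    · simp [List.foldl_cons, h, pvVUpd, ih]

-- B's running-best update mirrors min2?'s foldl step through pvKeyF
theorem pv_fold_min2 (ey : Int) (xs : List (Int × Option Int × Option Int))
    (a : Option (Int × Option Int × Option Int)) :
    xs.foldl (pvAnyUpd ey) (a.map (pvKeyF ey)) =
      (xs.foldl
        (fun acc x =>
          match acc with
          | none => some x
          | some m =>
            if (decide (pvKey1 ey x < pvKey1 ey m) || (!decide (pvKey1 ey m < pvKey1 ey x) && decide (x.1 < m.1))) = true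
            then some x else some m)
        a).map (pvKeyF ey) := by
  induction xs generalizing a with
  | nil => rfl
  | cons x xs ih =>
    have hstep : pvAnyUpd ey (a.map (pvKeyF ey)) x =
        Option.map (pvKeyF ey)
          (match a with
           | none => some x
           | some m =>
             if (decide (pvKey1 ey x < pvKey1 ey m) || (!decide (pvKey1 ey m < pvKey1 ey x) && decide (x.1 < m.1))) = true
             then some x else some m) := by
      cases a with
      | none => rfl
      | some m =>
        simp only [Option.map_some, pvAnyUpd, pvKeyF]
        have hiff : (decide (pvKey1 ey x < pvKey1 ey m) || (!decide (pvKey1 ey m < pvKey1 ey x) && decide (x.1 < m.1))) = true ↔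
            (pvKey1 ey x < pvKey1 ey m ∨ (pvKey1 ey x = pvKey1 ey m ∧ x.1 < m.1)) := by
          simp only [Bool.or_eq_true, Bool.and_eq_true, Bool.not_eq_true', decide_eq_true_iff, decide_eq_false_iff_not]
          constructor <;> intro h <;> rcases h with h | ⟨h1, h2⟩ <;> omega
        by_cases hc : pvKey1 ey x < pvKey1 ey m ∨ (pvKey1 ey x = pvKey1 ey m ∧ x.1 < m.1)
        · rw [if_pos hc, if_pos (hiff.mpr hc)]; simp [pvKeyF]
        · rw [if_neg hc, if_neg (fun h => hc (hiff.mp h))]; simp [pvKeyF]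
    simp only [List.foldl_cons, hstep]
    exact ih _

theorem pv_any_min2 (ey : Int) (xs : List (Int × Option Int × Option Int)) :
    xs.foldl (pvAnyUpd ey) none = (PySem.List.min2? xs (pvKey1 ey) (fun t => t.1)).map (pvKeyF ey) := by
  have e : (PySem.List.min2? xs (pvKey1 ey) (fun t => t.1)) =
      xs.foldl
        (fun acc x =>
          match acc with
          | none => some x
          | some m =>
            if (decide (pvKey1 ey x < pvKey1 ey m) || (!decide (pvKey1 ey m < pvKey1 ey x) && decide (x.1 < m.1))) = true
            then some x else some m)
        none := by
    unfold PySem.List.min2?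
    congr 1
    funext acc x
    cases acc <;> rfl
  rw [e]
  exact pv_fold_min2 ey xs none

theorem pv_fold_some {α κ₁ κ₂ : Type} [LT κ₁] [DecidableLT κ₁] [LT κ₂] [DecidableLT κ₂]
    (k1 : α → κ₁) (k2 : α → κ₂) (t : List α) (a : α) :
    ∃ m, (t.foldl
      (fun acc x =>
        match acc with
        | none => some x
        | some m =>
          if (decide (k1 x < k1 m) || (!decide (k1 m < k1 x) && decide (k2 x < k2 m))) = true
          then some x else some m)
      (some a)) = some m := by
  induction t generalizing a with
  | nil => exact ⟨a, rfl⟩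
  | cons x t ih =>
    simp only [List.foldl_cons]
    by_cases hcc : (decide (k1 x < k1 a) || (!decide (k1 a < k1 x) && decide (k2 x < k2 a))) = true
    · rw [if_pos hcc]; exact ih x
    · rw [if_neg hcc]; exact ih a

theorem pv_min2_some {α κ₁ κ₂ : Type} [LT κ₁] [DecidableLT κ₁] [LT κ₂] [DecidableLT κ₂]
    (xs : List α) (k1 : α → κ₁) (k2 : α → κ₂) (h : xs ≠ []) :
    ∃ m, PySem.List.min2? xs k1 k2 = some m := by
  cases xs with
  | nil => exact absurd rfl h
  | cons x t =>
    simp only [PySem.List.min2?, List.foldl_cons]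
    exact pv_fold_some k1 k2 t x



-- ===== VERDICT (by name: the statement is the Claim_ definition above) =====
theorem choose_trip_for_event_py_spec : Claim_equal_choose_trip_for_event_py := by
  intro trl lid ey _
  unfold Spec_choose_trip_for_event_py choose_trip_for_event_py choose_trip_for_event_py_alt
  set cand := (PySem.Dict.mk trl).getD lid [] with hcand
  by_cases hc : cand = []
  · simp [hc]
  · simp only [if_neg hc]
    rw [pv_fold_pair, pv_fold_filter, pv_any_min2, pv_any_min2]
    set valid := cand.filter (pvValid ey) with hvalid
    by_cases hv : valid = []
    · obtain ⟨m, hm⟩ := pv_min2_some cand (pvKey1 ey) (fun t => t.1) hc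
      rw [hv, hm]
      have h0 : ¬ ([] : List (Int × Option Int × Option Int)).length = 1 := by simp
      rw [if_neg h0, if_pos rfl, hm]
      simp [pvKeyF, PySem.List.min2?]
    · obtain ⟨m, hm⟩ := pv_min2_some valid (pvKey1 ey) (fun t => t.1) hv
      rw [hm]
      by_cases h1 : valid.length = 1
      · obtain ⟨t, ht⟩ := List.length_eq_one_iff.mp h1
        have hmt : m = t := by
          rw [ht] at hm
          simpa [PySem.List.min2?] using hm.symm
        rw [if_pos h1, ht]
        simp [hmt, pvKeyF, PySem.List.pyGet?, PySem.List.pyIdx?]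
      · rw [if_neg h1, if_neg hv, hm]
        simp [pvKeyF]
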